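-- pv_equiv track=rewrite | github.com/joshuarocksolid/ChoreBoyCodeStudio | app/intelligence/jedi_engine.py | _extract_symbol_under_cursor
-- ===== SOURCE A (Python) =====
-- def _extract_symbol_under_cursor(source_text: str, cursor_position: int) -> str:
--     safe_cursor = max(0, min(cursor_position, len(source_text)))
--     left = safe_cursor
--     while left > 0 and _is_symbol_character(source_text[left - 1]):
--         left -= 1
--     right = safe_cursor
--     while right < len(source_text) and _is_symbol_character(source_text[right]):
--         right += 1
--     symbol = source_text[left:right].strip()
--     return symbol if symbol.isidentifier() else ""
--
-- def _is_symbol_character(character: str) -> bool: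
--     return character.isalnum() or character == "_"
-- ===== SOURCE B (Python) =====
-- import re
--
-- def _extract_symbol_under_cursor(source_text: str, cursor_position: int) -> str:
--     safe_cursor = max(0, min(cursor_position, len(source_text)))
--     for match in re.finditer(r'\w+', source_text):
--         if match.start() <= safe_cursor <= match.end():
--             symbol = match.group()
--             return symbol if symbol.isidentifier() else ""
--     return ""
-- ===== Notes on version B (the rewrite author's own statement) =====
-- stated objective: idiomatic
-- what changed: Replaces the two-pointer left/right character-by-character expansion with a regex tokenize-then-select pass: enumerate all \w+ runs with re.finditer and pick the unique run whose inclusive span contains the clamped cursor.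
import Mathlib
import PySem

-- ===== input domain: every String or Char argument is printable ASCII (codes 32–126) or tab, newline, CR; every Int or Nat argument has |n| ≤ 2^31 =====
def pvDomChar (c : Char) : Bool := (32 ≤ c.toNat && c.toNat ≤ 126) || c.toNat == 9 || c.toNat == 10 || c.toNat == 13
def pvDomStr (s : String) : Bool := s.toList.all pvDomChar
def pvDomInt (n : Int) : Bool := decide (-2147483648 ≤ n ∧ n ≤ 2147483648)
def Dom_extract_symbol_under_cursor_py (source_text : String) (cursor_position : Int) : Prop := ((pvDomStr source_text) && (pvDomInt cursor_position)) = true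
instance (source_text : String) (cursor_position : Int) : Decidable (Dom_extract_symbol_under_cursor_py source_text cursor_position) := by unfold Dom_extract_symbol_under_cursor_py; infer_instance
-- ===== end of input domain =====

-- B replaces A's two-pointer left/right expansion around the cursor by a tokenize-then-select
-- pass (enumerate all maximal word-character runs, pick the run whose inclusive span contains
-- the clamped cursor); objective: idiomatic, same cost.

-- ===== PORT A =====
-- _is_symbol_character(c) = c.isalnum() or c == "_"  (exact on the ASCII domain)
def pvIsSymbolCharacter (c : Char) : Bool := PySem.Chars.isalnum c || c == '_'

-- while left > 0 and _is_symbol_character(source_text[left - 1]): left -= 1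
def pvLeftLoop (s : List Char) : Nat → Nat
  | 0 => 0
  | l + 1 => if pvIsSymbolCharacter (s.getD l ' ') then pvLeftLoop s l else l + 1

-- while right < len(source_text) and _is_symbol_character(source_text[right]): right += 1
def pvRightLoop (s : List Char) (r : Nat) : Nat :=
  if _h : r < s.length then
    if pvIsSymbolCharacter (s.getD r ' ') then pvRightLoop s (r + 1) else r
  else r
termination_by s.length - r

-- str.isidentifier, hand-ported (PySem has no isidentifier); exact on the ASCII domain:
-- nonempty, first char a letter or '_', the rest alphanumeric or '_'
def pvIsIdentifier (cs : List Char) : Bool :=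
  match cs with
  | [] => false
  | c :: rest => (PySem.Chars.isalpha c || c == '_') && rest.all (fun d => PySem.Chars.isalnum d || d == '_')

def extract_symbol_under_cursor_py (source_text : String) (cursor_position : Int) : String :=
  let s := source_text.toList
  let safe : Nat := (max 0 (min cursor_position (s.length : Int))).toNat
  let left := pvLeftLoop s safe
  let right := pvRightLoop s safe
  let symbol := PySem.Chars.strip (PySem.List.slice s (some (left : Int)) (some (right : Int)))
  if pvIsIdentifier symbol then String.ofList symbol else ""

-- ===== PORT B =====
-- re.finditer(r'\w+', text): the list of (start, run) for every maximal run of word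
-- characters, scanned left to right (on the ASCII domain \w is exactly pvIsSymbolCharacter)
def pvWordRuns (s : List Char) (i : Nat) : List (Nat × List Char) :=
  match s with
  | [] => []
  | c :: t =>
    if pvIsSymbolCharacter c then
      (i, c :: t.takeWhile pvIsSymbolCharacter) ::
        pvWordRuns (t.dropWhile pvIsSymbolCharacter) (i + 1 + (t.takeWhile pvIsSymbolCharacter).length)
    else pvWordRuns t (i + 1)
termination_by s.length
decreasing_by
  · exact Nat.lt_succ_of_le (List.length_dropWhile_le _ _)
  · simp

def extract_symbol_under_cursor_py_alt (source_text : String) (cursor_position : Int) : String :=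
  let s := source_text.toList
  let safe : Nat := (max 0 (min cursor_position (s.length : Int))).toNat
  match (pvWordRuns s 0).find? (fun p => p.1 ≤ safe && safe ≤ p.1 + p.2.length) with
  | some p => if pvIsIdentifier p.2 then String.ofList p.2 else ""
  | none => ""

-- ===== PRECONDITION & SPEC =====
def Spec_extract_symbol_under_cursor_py (source_text : String) (cursor_position : Int) (out : String) : Prop := out = extract_symbol_under_cursor_py_alt source_text cursor_position
instance (source_text : String) (cursor_position : Int) (out : String) : Decidable (Spec_extract_symbol_under_cursor_py source_text cursor_position out) := by unfold Spec_extract_symbol_under_cursor_py; infer_instance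

-- ===== CLAIM (what is proved, stated in full; the proofs are below) =====
def Claim_equal_extract_symbol_under_cursor_py : Prop := ∀ (source_text : String) (cursor_position : Int), Dom_extract_symbol_under_cursor_py source_text cursor_position → Spec_extract_symbol_under_cursor_py source_text cursor_position (extract_symbol_under_cursor_py source_text cursor_position)

-- ===== LEMMAS AND PROOFS =====

theorem pvRightLoop_eq (s : List Char) (r : Nat) (h : r ≤ s.length) :
    pvRightLoop s r = r + ((s.drop r).takeWhile pvIsSymbolCharacter).length := by
  fun_induction pvRightLoop s r with
  | case1 r hlt hw ih =>
    rw [List.drop_eq_getElem_cons hlt, List.takeWhile_cons]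
    rw [List.getD_eq_getElem s ' ' hlt] at hw
    simp only [hw, if_pos]
    rw [ih (by omega)]
    simp; omega
  | case2 r hlt hw =>
    rw [List.drop_eq_getElem_cons hlt, List.takeWhile_cons]
    rw [List.getD_eq_getElem s ' ' hlt] at hw
    simp [hw]
  | case3 r hlt =>
    have h2 : s.length ≤ r := by omega
    rw [List.drop_eq_nil_of_le h2]
    simp

theorem pvLeftLoop_eq (s : List Char) (l : Nat) (h : l ≤ s.length) :
    pvLeftLoop s l = l - ((s.take l).reverse.takeWhile pvIsSymbolCharacter).length := by
  induction l with
  | zero => simp [pvLeftLoop]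
  | succ l ih =>
    have hl : l < s.length := by omega
    rw [List.take_add_one, List.getElem?_eq_getElem hl]
    simp only [Option.toList_some, List.reverse_append, List.reverse_cons, List.reverse_nil,
      List.nil_append, List.singleton_append, List.takeWhile_cons, pvLeftLoop]
    rw [List.getD_eq_getElem s ' ' hl]
    by_cases hw : pvIsSymbolCharacter (s[l]'hl) = true
    · simp only [hw, if_pos]
      rw [ih (by omega)]
      simp
    · simp [hw]

theorem takeWhile_take_drop {α : Type} (p : α → Bool) (l : List α) (j : Nat)
    (h : j ≤ (l.takeWhile p).length) :
    l.takeWhile p = l.take j ++ (l.drop j).takeWhile p := by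
  induction j generalizing l with
  | zero => simp
  | succ j ih =>
    cases l with
    | nil => simp at h
    | cons a t =>
      rw [List.takeWhile_cons] at h ⊢
      by_cases hp : p a = true
      · simp only [hp, if_pos] at h ⊢
        rw [List.take_succ_cons, List.drop_succ_cons, List.cons_append]
        rw [← ih t (by simpa using h)]
      · simp [hp] at h

theorem dropWhile_eq_drop {α : Type} (p : α → Bool) (l : List α) :
    l.dropWhile p = l.drop (l.takeWhile p).length := by
  induction l with
  | nil => simp
  | cons a t ih => by_cases hp : p a = true <;> simp [List.dropWhile_cons, List.takeWhile_cons, hp, ih]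

theorem dropWhile_head_false {α : Type} (p : α → Bool) (l : List α) (c : α) (t : List α)
    (h : l.dropWhile p = c :: t) : p c = false := by
  induction l with
  | nil => simp at h
  | cons a l ih =>
    rw [List.dropWhile_cons] at h
    split at h
    · exact ih h
    · cases h; simp_all

theorem pvWordRuns_start_ge (s : List Char) (i : Nat) :
    ∀ q ∈ pvWordRuns s i, i ≤ q.1 := by
  fun_induction pvWordRuns s i with
  | case1 i => simp
  | case2 i c t hw ih =>
    intro q hq
    rcases List.mem_cons.mp hq with rfl | hq
    · exact Nat.le_refl i
    · exact Nat.le_trans (by omega) (ih q hq)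
  | case3 i c t hw ih =>
    intro q hq
    exact Nat.le_trans (by omega) (ih q hq)

theorem pvWordRuns_find (s : List Char) (i : Nat) :
    ∀ k, k ≤ s.length →
    ((pvWordRuns s i).find? (fun p => decide (p.1 ≤ i + k) && decide (i + k ≤ p.1 + p.2.length))) =
      (if ((s.take k).reverse.takeWhile pvIsSymbolCharacter) = [] ∧ ((s.drop k).takeWhile pvIsSymbolCharacter) = [] then none
       else some (i + k - ((s.take k).reverse.takeWhile pvIsSymbolCharacter).length,
         ((s.take k).reverse.takeWhile pvIsSymbolCharacter).reverse ++ ((s.drop k).takeWhile pvIsSymbolCharacter))) := by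
  fun_induction pvWordRuns s i with
  | case1 i =>
    intro k hk
    have : k = 0 := by simpa using hk
    subst this
    simp
  | case2 i c t hw ih =>
    intro k hk
    by_cases hcase : k ≤ 1 + (t.takeWhile pvIsSymbolCharacter).length
    · rw [List.find?_cons_of_pos (by simp; omega)]
      cases k with
      | zero =>
        have hcond : ¬ ((((c :: t).take 0).reverse.takeWhile pvIsSymbolCharacter) = [] ∧
            (((c :: t).drop 0).takeWhile pvIsSymbolCharacter) = []) := by
          simp [List.takeWhile_cons, hw]
        rw [if_neg hcond]
        simp [List.takeWhile_cons, hw]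
      | succ k2 =>
        have hk2 : k2 ≤ (t.takeWhile pvIsSymbolCharacter).length := by omega
        have hall : ∀ x ∈ t.take k2, pvIsSymbolCharacter x = true := by
          intro x hx
          exact List.mem_takeWhile_imp
            (by rw [takeWhile_take_drop pvIsSymbolCharacter t k2 hk2]; exact List.mem_append_left _ hx)
        have hB : ((c :: t).take (k2+1)).reverse.takeWhile pvIsSymbolCharacter = (t.take k2).reverse ++ [c] := by
          rw [List.take_succ_cons, List.reverse_cons]
          refine List.takeWhile_eq_self_iff.mpr ?_
          intro x hx
          rcases List.mem_append.mp hx with hx | hx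
          · exact hall x (List.mem_reverse.mp hx)
          · rcases List.mem_singleton.mp hx with rfl
            exact hw
        have hkt : k2 ≤ t.length := by
          have := (List.takeWhile_prefix (l := t) pvIsSymbolCharacter).length_le
          omega
        have hcond : ¬ ((((c :: t).take (k2+1)).reverse.takeWhile pvIsSymbolCharacter) = [] ∧
            (((c :: t).drop (k2+1)).takeWhile pvIsSymbolCharacter) = []) := by
          rw [hB]; simp
        rw [if_neg hcond, hB, List.drop_succ_cons]
        have hlenB : ((t.take k2).reverse ++ [c]).length = k2 + 1 := by
          simp [List.length_take]; omega
        rw [hlenB]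
        have hval : c :: t.takeWhile pvIsSymbolCharacter
            = ((t.take k2).reverse ++ [c]).reverse ++ (t.drop k2).takeWhile pvIsSymbolCharacter := by
          rw [List.reverse_append, List.reverse_reverse]
          simp only [List.reverse_cons, List.reverse_nil, List.nil_append, List.singleton_append,
            List.cons_append]
          rw [← takeWhile_take_drop pvIsSymbolCharacter t k2 hk2]
        rw [← hval]
        have hi : i + (k2+1) - (k2+1) = i := by omega
        rw [hi]
    · rw [List.find?_cons_of_neg (by simp; omega)]
      have hlen : (t.takeWhile pvIsSymbolCharacter).length + (t.dropWhile pvIsSymbolCharacter).length = t.length := by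
        have h0 := congrArg List.length
          (List.takeWhile_append_dropWhile (p := pvIsSymbolCharacter) (l := t))
        rw [List.length_append] at h0
        exact h0
      obtain ⟨k2, rfl⟩ : ∃ k2, k = ((t.takeWhile pvIsSymbolCharacter).length + k2) + 1 :=
        ⟨k - 1 - (t.takeWhile pvIsSymbolCharacter).length, by omega⟩
      have hk2pos : 1 ≤ k2 := by omega
      have hk2le : k2 ≤ (t.dropWhile pvIsSymbolCharacter).length := by
        simp at hk
        omega
      have hF : ((c :: t).drop ((t.takeWhile pvIsSymbolCharacter).length + k2 + 1)).takeWhile pvIsSymbolCharacter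
          = ((t.dropWhile pvIsSymbolCharacter).drop k2).takeWhile pvIsSymbolCharacter := by
        rw [List.drop_succ_cons, ← List.drop_drop, ← dropWhile_eq_drop]
      have htr : t.take ((t.takeWhile pvIsSymbolCharacter).length + k2)
          = t.takeWhile pvIsSymbolCharacter ++ (t.dropWhile pvIsSymbolCharacter).take k2 := by
        rw [List.take_add, ← List.prefix_iff_eq_take.mp (List.takeWhile_prefix pvIsSymbolCharacter),
          ← dropWhile_eq_drop]
      have hB : ((c :: t).take ((t.takeWhile pvIsSymbolCharacter).length + k2 + 1)).reverse.takeWhile pvIsSymbolCharacter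
          = ((t.dropWhile pvIsSymbolCharacter).take k2).reverse.takeWhile pvIsSymbolCharacter := by
        rw [List.take_succ_cons, List.reverse_cons, htr, List.reverse_append, List.append_assoc,
          List.takeWhile_append]
        split
        · exfalso
          rename_i hLen
          have hXeq := (List.takeWhile_prefix (l := ((t.dropWhile pvIsSymbolCharacter).take k2).reverse) pvIsSymbolCharacter).eq_of_length hLen
          cases hrest : t.dropWhile pvIsSymbolCharacter with
          | nil => rw [hrest] at hk2le; simp at hk2le; omega
          | cons d u =>
            have hd : pvIsSymbolCharacter d = false := dropWhile_head_false pvIsSymbolCharacter t d u hrest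
            have hdmem : d ∈ ((t.dropWhile pvIsSymbolCharacter).take k2).reverse := by
              rw [hrest]
              obtain ⟨m, rfl⟩ : ∃ m, k2 = m + 1 := ⟨k2 - 1, by omega⟩
              simp [List.take_succ_cons]
            rw [← hXeq] at hdmem
            have := List.mem_takeWhile_imp hdmem
            simp [hd] at this
        · rfl
      have hik : i + ((t.takeWhile pvIsSymbolCharacter).length + k2 + 1)
          = (i + 1 + (t.takeWhile pvIsSymbolCharacter).length) + k2 := by omega
      rw [hB, hF, hik]
      exact ih k2 hk2le
  | case3 i c t hw ih =>
    intro k hk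
    cases k with
    | zero =>
      rw [List.find?_eq_none.mpr (fun q hq => by
        have := pvWordRuns_start_ge _ _ q hq
        simp
        omega)]
      have hc : (((c :: t).take 0).reverse.takeWhile pvIsSymbolCharacter) = [] ∧
          (((c :: t).drop 0).takeWhile pvIsSymbolCharacter) = [] := by
        refine ⟨by simp, by simp [List.takeWhile_cons, hw]⟩
      rw [if_pos hc]
    | succ k1 =>
      have hk1 : k1 ≤ t.length := by simpa using hk
      have hB : ((c :: t).take (k1+1)).reverse.takeWhile pvIsSymbolCharacter = ((t.take k1).reverse).takeWhile pvIsSymbolCharacter := by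
        rw [List.take_succ_cons, List.reverse_cons, List.takeWhile_append]
        split
        · rename_i hLen
          have hXeq := (List.takeWhile_prefix (l := (t.take k1).reverse) pvIsSymbolCharacter).eq_of_length hLen
          simp [List.takeWhile_cons, hw, hXeq]
        · rfl
      have hik : i + (k1+1) = (i + 1) + k1 := by omega
      rw [hB, List.drop_succ_cons, hik]
      exact ih k1 hk1

-- word characters are not whitespace …
theorem isspace_false_of_sym (c : Char) (h : pvIsSymbolCharacter c = true) :
    PySem.Chars.isspace c = false := by
  simp only [pvIsSymbolCharacter, Bool.or_eq_true, beq_iff_eq] at h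
  rcases h with h' | rfl
  · have hv : c.toNat = c.val.toNat := rfl
    simp only [PySem.Chars.isalnum, PySem.Chars.isalpha, PySem.Chars.isdigit, PySem.Chars.isupper,
      PySem.Chars.islower, Bool.or_eq_true, Bool.and_eq_true, decide_eq_true_eq,
      Char.le_def, UInt32.le_iff_toNat_le] at h'
    simp only [PySem.Chars.isspace, Bool.or_eq_false_iff, Bool.and_eq_false_iff,
      decide_eq_false_iff_not]
    have h48 : ('0' : Char).val.toNat = 48 := rfl
    have h57 : ('9' : Char).val.toNat = 57 := rfl
    have h65 : ('A' : Char).val.toNat = 65 := rfl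
    have h90 : ('Z' : Char).val.toNat = 90 := rfl
    have h97 : ('a' : Char).val.toNat = 97 := rfl
    have h122 : ('z' : Char).val.toNat = 122 := rfl
    omega
  · decide

-- … so strip is a no-op on a word run
theorem strip_noop (l : List Char) (h : ∀ c ∈ l, PySem.Chars.isspace c = false) :
    PySem.Chars.strip l = l := by
  have hdw : ∀ (m : List Char), (∀ c ∈ m, PySem.Chars.isspace c = false) →
      m.dropWhile PySem.Chars.isspace = m := by
    intro m hm
    cases m with
    | nil => rfl
    | cons a t =>
      rw [List.dropWhile_cons, if_neg (by simp [hm a (by simp)])]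
  unfold PySem.Chars.strip PySem.Chars.lstrip PySem.Chars.rstrip
  rw [hdw l h, hdw l.reverse (fun c hc => h c (List.mem_reverse.mp hc)), List.reverse_reverse]

-- ===== VERDICT (by name: the statement is the Claim_ definition above) =====
theorem extract_symbol_under_cursor_py_spec : Claim_equal_extract_symbol_under_cursor_py := by
  intro st cp _
  unfold Spec_extract_symbol_under_cursor_py
  simp only [extract_symbol_under_cursor_py, extract_symbol_under_cursor_py_alt]
  generalize st.toList = s
  set safe := (max 0 (min cp ((s.length : Int)))).toNat with hsafedef
  have hsafe : safe ≤ s.length := by rw [hsafedef]; omega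
  rw [pvLeftLoop_eq s safe hsafe, pvRightLoop_eq s safe hsafe]
  rw [PySem.List.slice_natCast]
  have hBle : ((s.take safe).reverse.takeWhile pvIsSymbolCharacter).length ≤ safe := by
    have h1 := (List.takeWhile_prefix (l := (s.take safe).reverse) pvIsSymbolCharacter).length_le
    simp only [List.length_reverse, List.length_take] at h1
    omega
  have hsub : safe + ((s.drop safe).takeWhile pvIsSymbolCharacter).length
      - (safe - ((s.take safe).reverse.takeWhile pvIsSymbolCharacter).length)
      = ((s.take safe).reverse.takeWhile pvIsSymbolCharacter).length
        + ((s.drop safe).takeWhile pvIsSymbolCharacter).length := by omega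
  rw [hsub]
  have hslice : (s.drop (safe - ((s.take safe).reverse.takeWhile pvIsSymbolCharacter).length)).take
      (((s.take safe).reverse.takeWhile pvIsSymbolCharacter).length
        + ((s.drop safe).takeWhile pvIsSymbolCharacter).length)
      = ((s.take safe).reverse.takeWhile pvIsSymbolCharacter).reverse
        ++ ((s.drop safe).takeWhile pvIsSymbolCharacter) := by
    rw [List.take_add]
    congr 1
    · have hBtake : (s.take safe).reverse.takeWhile pvIsSymbolCharacter
          = ((s.take safe).reverse).take
              ((s.take safe).reverse.takeWhile pvIsSymbolCharacter).length :=
        List.prefix_iff_eq_take.mp (List.takeWhile_prefix _)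
      conv_rhs => rw [hBtake, List.reverse_take]
      simp only [List.reverse_reverse, List.length_reverse, List.length_take,
        min_eq_left hsafe]
      rw [List.drop_take, Nat.sub_sub_self hBle]
    · rw [List.drop_drop, Nat.sub_add_cancel hBle]
      exact (List.prefix_iff_eq_take.mp (List.takeWhile_prefix _)).symm
  rw [hslice]
  have hmem : ∀ x ∈ ((s.take safe).reverse.takeWhile pvIsSymbolCharacter).reverse
      ++ ((s.drop safe).takeWhile pvIsSymbolCharacter), pvIsSymbolCharacter x = true := by
    intro x hx
    rcases List.mem_append.mp hx with hx | hx
    · exact List.mem_takeWhile_imp (List.mem_reverse.mp hx)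
    · exact List.mem_takeWhile_imp hx
  rw [strip_noop _ (fun c hc => isspace_false_of_sym c (hmem c hc))]
  have hfind := pvWordRuns_find s 0 safe hsafe
  simp only [Nat.zero_add] at hfind
  rw [hfind]
  by_cases hBF : ((s.take safe).reverse.takeWhile pvIsSymbolCharacter) = [] ∧
      ((s.drop safe).takeWhile pvIsSymbolCharacter) = []
  · rw [if_pos hBF]
    obtain ⟨h1, h2⟩ := hBF
    rw [h1, h2]
    simp [pvIsIdentifier]
  · rw [if_neg hBF]
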